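-- pv_equiv track=rewrite | github.com/SickTheDuck1411/IT001-Python | DeDaiHoc/Smallestnumber.py | findSmallestNumberandAppearanceV2
-- ===== SOURCE A (Python) =====
-- def findSmallestNumberandAppearanceV2(array):
--     total = 0
--     smallest = array[0]
--     for i in range(0,len(array)):
--         if array[i] < smallest:
--             smallest = array[i]
--             total = 1
--         elif array[i]  == smallest:
--             total+=1
--     return total , smallest
-- ===== SOURCE B (Python) =====
-- def findSmallestNumberandAppearanceV2(array):
--     smallest = min(array)
--     return array.count(smallest), smallest
-- ===== Notes on version B (the rewrite author's own statement) =====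
-- stated objective: idiomatic
-- what changed: Replaces the single accumulating loop tracking (total, smallest) with two library passes: min(array) then array.count(smallest).
import Mathlib
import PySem

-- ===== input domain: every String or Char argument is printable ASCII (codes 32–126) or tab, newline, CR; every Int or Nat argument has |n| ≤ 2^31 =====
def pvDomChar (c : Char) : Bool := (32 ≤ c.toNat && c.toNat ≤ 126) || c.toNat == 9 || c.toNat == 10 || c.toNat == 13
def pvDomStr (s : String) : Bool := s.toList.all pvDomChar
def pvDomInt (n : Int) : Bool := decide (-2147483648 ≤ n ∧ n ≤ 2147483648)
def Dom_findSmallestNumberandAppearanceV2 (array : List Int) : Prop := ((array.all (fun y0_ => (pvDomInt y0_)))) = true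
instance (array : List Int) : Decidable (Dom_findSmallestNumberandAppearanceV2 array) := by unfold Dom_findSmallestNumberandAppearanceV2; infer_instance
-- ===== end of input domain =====

-- B replaces A's single accumulating loop with two library passes (min, then count); same O(n) cost, more idiomatic.


-- ===== PORT A =====
-- 'for i in range(0, len(array)): … array[i] …' visits the elements of array in order;
-- ported as a fold over the list (exact: every index is in range).
def findSmallestNumberandAppearanceV2 (array : List Int) : Int × Int :=
  match array with
  | [] => (0, 0)  -- array[0] raises IndexError; excluded by Pre_
  | a0 :: _ =>
    array.foldl (fun (st : Int × Int) x =>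
      if x < st.2 then (1, x)
      else if x = st.2 then (st.1 + 1, st.2)
      else st) (0, a0)

-- ===== PORT B =====
def findSmallestNumberandAppearanceV2_alt (array : List Int) : Int × Int :=
  match PySem.List.min? array (fun x => x) with
  | none => (0, 0)  -- min([]) raises ValueError; excluded by Pre_
  | some m => ((PySem.List.count array m : Int), m)

-- ===== PRECONDITION & SPEC =====
-- Pre_ excludes only the empty list, on which A raises IndexError (and B raises ValueError).
def Pre_findSmallestNumberandAppearanceV2 (array : List Int) : Prop := array ≠ []
instance (array : List Int) : Decidable (Pre_findSmallestNumberandAppearanceV2 array) := by unfold Pre_findSmallestNumberandAppearanceV2; infer_instance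
def pvWitness_findSmallestNumberandAppearanceV2 : List Int := [3, 1, 1, 2]

def Spec_findSmallestNumberandAppearanceV2 (array : List Int) (out : Int × Int) : Prop := out = findSmallestNumberandAppearanceV2_alt array
instance (array : List Int) (out : Int × Int) : Decidable (Spec_findSmallestNumberandAppearanceV2 array out) := by unfold Spec_findSmallestNumberandAppearanceV2; infer_instance

-- ===== CLAIM (what is proved, stated in full; the proofs are below) =====
def Claim_equal_findSmallestNumberandAppearanceV2 : Prop := ∀ (array : List Int), Dom_findSmallestNumberandAppearanceV2 array → Pre_findSmallestNumberandAppearanceV2 array → Spec_findSmallestNumberandAppearanceV2 array (findSmallestNumberandAppearanceV2 array)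

-- ===== LEMMAS AND PROOFS =====

theorem foldl_min_le (l : List Int) (s : Int) : l.foldl min s ≤ s := by
  induction l generalizing s with
  | nil => simp
  | cons x l ih =>
    simp only [List.foldl_cons]
    exact le_trans (ih (min s x)) (min_le_left s x)

theorem loop_char (l : List Int) (t s : Int) :
    l.foldl (fun (st : Int × Int) x =>
      if x < st.2 then (1, x)
      else if x = st.2 then (st.1 + 1, st.2)
      else st) (t, s)
    = ((if l.foldl min s < s then 0 else t) + (l.count (l.foldl min s) : Int),
       l.foldl min s) := by
  induction l generalizing t s with
  | nil => simp
  | cons x l ih =>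
    simp only [List.foldl_cons, List.count_cons]
    by_cases h1 : x < s
    · have hmin : min s x = x := by omega
      rw [if_pos h1]
      simp only [hmin]
      rw [ih]
      have hle := foldl_min_le l x
      have hlt : l.foldl min x < s := lt_of_le_of_lt hle h1
      rw [if_pos hlt]
      by_cases h2 : l.foldl min x < x
      · rw [if_pos h2]
        have hne : ¬ (x == l.foldl min x) = true := by simp; omega
        simp [hne]
      · have heq : l.foldl min x = x := le_antisymm hle (by omega)
        rw [if_neg h2]
        simp [heq]
        omega
    · have hmin : min s x = s := by omega
      by_cases h2 : x = s
      · rw [if_neg h1, if_pos h2]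
        simp only [hmin]
        rw [ih]
        by_cases h3 : l.foldl min s < s
        · have hne : ¬ (x == l.foldl min s) = true := by simp; omega
          simp [h3, hne]
        · have heq : l.foldl min s = s := le_antisymm (foldl_min_le l s) (by omega)
          have hbe : (x == l.foldl min s) = true := by simp [h2, heq]
          simp [h3, hbe]
          omega
      · rw [if_neg h1, if_neg h2]
        simp only [hmin]
        rw [ih]
        have hle := foldl_min_le l s
        have hne : ¬ (x == l.foldl min s) = true := by simp; omega
        simp [hne]

-- ===== VERDICT (by name: the statement is the Claim_ definition above) =====
theorem findSmallestNumberandAppearanceV2_spec : Claim_equal_findSmallestNumberandAppearanceV2 := by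
  intro array _ hpre
  unfold Spec_findSmallestNumberandAppearanceV2
  match array with
  | [] => exact absurd rfl hpre
  | a0 :: l =>
    unfold findSmallestNumberandAppearanceV2 findSmallestNumberandAppearanceV2_alt
    rw [PySem.List.min?_id_cons]
    simp only [List.foldl_cons] at *
    norm_num [loop_char, PySem.List.count_eq]
    rw [List.count_cons]
    by_cases h : l.foldl min a0 < a0
    · have hne : ¬ (a0 == l.foldl min a0) = true := by simp; omega
      simp [h, hne]
    · have heq : l.foldl min a0 = a0 := le_antisymm (foldl_min_le l a0) (by omega)
      simp [heq]
      omega
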